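-- pv_equiv track=rewrite | github.com/Pedro-Laredo/LECI | 1 ano/1 semestre/Codigo/FP/Aula 05/countloert.py | countlower
-- ===== SOURCE A (Python) =====
-- def countlower(lst,v):
--
--     b= max(lst)
--     c = min(lst)
--
--     a = 0
--     for i in range (c,b+1):
--
--         if i<v:
--             a = a +1
--
--     return a
-- ===== SOURCE B (Python) =====
-- def countlower(lst, v):
--     lo = min(lst)
--     hi = max(lst)
--     return max(0, min(hi, v - 1) - lo + 1)
-- ===== Notes on version B (the rewrite author's own statement) =====
-- stated objective: faster
-- what changed: replaced the element-by-element loop over range(min,max+1) by the closed-form count max(0, min(max,v-1)-min+1)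
import Mathlib
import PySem

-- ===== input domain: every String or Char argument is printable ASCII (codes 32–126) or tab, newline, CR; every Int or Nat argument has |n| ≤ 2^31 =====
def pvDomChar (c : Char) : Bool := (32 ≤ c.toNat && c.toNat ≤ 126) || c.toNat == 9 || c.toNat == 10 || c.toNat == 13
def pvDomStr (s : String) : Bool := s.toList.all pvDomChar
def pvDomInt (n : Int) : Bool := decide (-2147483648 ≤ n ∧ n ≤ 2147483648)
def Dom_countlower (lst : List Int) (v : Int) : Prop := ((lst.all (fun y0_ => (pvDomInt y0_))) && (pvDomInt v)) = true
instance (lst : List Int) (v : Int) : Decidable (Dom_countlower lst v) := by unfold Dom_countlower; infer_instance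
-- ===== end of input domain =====

-- ===== PORT A =====
-- literal port of A: b = max(lst), c = min(lst), then a loop over range(c, b+1) counting i < v.
def countlower (lst : List Int) (v : Int) : Int :=
  match PySem.List.max? lst (fun x => x), PySem.List.min? lst (fun x => x) with
  | some b, some c =>
      (PySem.List.pyRange c (b + 1) 1).foldl (fun a i => if i < v then a + 1 else a) 0
  | _, _ => 0   -- unreachable: Python's max([]) raises ValueError; excluded by Pre_

-- ===== PORT B =====
-- B: closed form max(0, min(hi, v-1) - lo + 1) with lo = min(lst), hi = max(lst).
def countlower_alt (lst : List Int) (v : Int) : Int :=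
  match PySem.List.min? lst (fun x => x) with
  | none => 0   -- unreachable: min([]) raises; excluded by Pre_
  | some lo =>
    match PySem.List.max? lst (fun x => x) with
    | none => 0
    | some hi => max 0 (min hi (v - 1) - lo + 1)

-- ===== PRECONDITION & SPEC =====
-- Python's max/min raise ValueError on an empty list, so A raises there.
def Pre_countlower (lst : List Int) (v : Int) : Prop := lst ≠ []
instance (lst : List Int) (v : Int) : Decidable (Pre_countlower lst v) := by
  unfold Pre_countlower; infer_instance
def pvWitness_countlower : List Int × Int := ([1, 4, 2], 3)
def Spec_countlower (lst : List Int) (v : Int) (out : Int) : Prop := out = countlower_alt lst v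
instance (lst : List Int) (v : Int) (out : Int) : Decidable (Spec_countlower lst v out) := by
  unfold Spec_countlower; infer_instance

-- ===== CLAIM (what is proved, stated in full; the proofs are below) =====
def Claim_equal_countlower : Prop := ∀ (lst : List Int) (v : Int),
  Dom_countlower lst v → Pre_countlower lst v → Spec_countlower lst v (countlower lst v)

-- ===== LEMMAS AND PROOFS =====
theorem count_range_closed (v : Int) (a b : Int) (k : Int) :
    (PySem.List.pyRange a b 1).foldl (fun acc i => if i < v then acc + 1 else acc) k
      = k + max 0 (min b v - a) := by
  by_cases hab : a < b
  · have hlt : (b - (a + 1)).toNat < (b - a).toNat := by omega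
    rw [PySem.List.pyRange_one_cons hab]
    simp only [List.foldl_cons]
    rw [count_range_closed v (a + 1) b]
    split_ifs with h <;> omega
  · have : PySem.List.pyRange a b 1 = [] := by
      rw [PySem.List.pyRange_one]
      have : (b - a).toNat = 0 := by omega
      simp [this]
    rw [this]
    simp only [List.foldl_nil]
    omega
termination_by (b - a).toNat

-- ===== VERDICT (by name: the statement is the Claim_ definition above) =====
theorem countlower_spec : Claim_equal_countlower := by
  intro lst v _ hpre
  rcases lst with _ | ⟨x, t⟩
  · exact absurd rfl hpre
  · unfold Spec_countlower countlower countlower_alt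
    rw [PySem.List.max?_id_cons, PySem.List.min?_id_cons]
    simp only
    rw [count_range_closed]
    have h1 : min (t.foldl max x + 1) v = min (t.foldl max x) (v - 1) + 1 := by omega
    omega
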